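-- pv_equiv track=rewrite | github.com/HeineCantor/UnionFindDecoder | custom_decoders/uf_arch/uf_arch_decoder.py | sample_fromStim
-- ===== SOURCE A (Python) =====
-- def sample_fromStim(stimSample, distance):
--     columnLength = (distance - 1) // 2
--     period = (distance + 1) * columnLength
--
--     starter_list = [0] * (distance - 1)
--     for i in range((distance - 1) // 2):
--         starter_list[2*i] = (distance - 1) - i - 1
--     for i in range((distance - 1) // 2):
--         starter_list[2*i + 1] = (distance - 1) // 2 - i - 1
--
--     for i in range(len(stimSample) // period):
--         round = stimSample[i * period:(i + 1) * period]
--         #converted = [round[2], round[0], round[3], round[1]]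
--         converted = [0] * period
--         for j in range(len(round)):
--             inner_period = 1 + (distance-1) // 2
--             inner_sum = j % inner_period * (distance - 1)
--             inner_offset = starter_list[j // inner_period]
--             conv_coord = inner_offset + inner_sum
--             converted[conv_coord] = round[j]
--         stimSample[i * period:(i + 1) * period] = converted
--
--     return stimSample
-- ===== SOURCE B (Python) =====
-- def sample_fromStim(stimSample, distance):
--     half = (distance - 1) // 2
--     period = (distance + 1) * half
--     n_blocks = len(stimSample) // period
--     if n_blocks <= 0:
--         return stimSample
--     width = distance - 1
--
--     def src(k):
--         r, s = divmod(k, width)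
--         q = 2 * (width - 1 - s) if s >= half else 2 * (half - 1 - s) + 1
--         return q * (half + 1) + r
--
--     head = [stimSample[(k // period) * period + src(k % period)]
--             for k in range(n_blocks * period)]
--     stimSample[:n_blocks * period] = head
--     return stimSample
-- ===== Notes on version B (the rewrite author's own statement) =====
-- stated objective: alternative
-- what changed: B replaces A's per-block slice/scatter-into-a-zero-buffer/splice-back loop by a single gather comprehension over the whole prefix using the closed-form inverse of the block permutation (no starter table, no per-block buffers), followed by one slice assignment; Pre_ excludes exactly the inputs where A raises (period==0 gives ZeroDivisionError; any distance that is not an odd distance >= 3 combined with at least one full block hits an out-of-range index in the scatter loop, IndexError).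
import Mathlib
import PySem

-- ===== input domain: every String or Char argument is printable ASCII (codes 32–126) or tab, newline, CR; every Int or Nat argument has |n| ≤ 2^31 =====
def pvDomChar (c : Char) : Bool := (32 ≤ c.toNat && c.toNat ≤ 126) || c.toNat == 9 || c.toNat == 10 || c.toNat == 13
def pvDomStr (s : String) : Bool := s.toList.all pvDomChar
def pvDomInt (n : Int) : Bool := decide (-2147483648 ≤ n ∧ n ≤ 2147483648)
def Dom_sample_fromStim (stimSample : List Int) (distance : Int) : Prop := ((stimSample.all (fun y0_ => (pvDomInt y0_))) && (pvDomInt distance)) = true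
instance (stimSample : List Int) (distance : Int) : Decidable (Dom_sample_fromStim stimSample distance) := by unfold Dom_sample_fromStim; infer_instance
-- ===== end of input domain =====

-- B permutes each full block by a single gather pass with the closed-form inverse
-- permutation instead of A's per-block scatter into a zero buffer ('alternative').
-- Both A and B mutate stimSample in place in Python; the equivalence proved here is
-- about the RETURN value (both return the same permuted list object contents).

-- ===== PORT A =====
-- starter_list = [0]*(distance-1) followed by the two index-assignment loops.
-- pySetD/pyGetD are the total forms of item assignment/indexing: exact wherever
-- Python does not raise IndexError, which Pre_ guarantees.
-- Python list item assignment on an Array accumulator (same semantics as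
-- PySem.List.pySetD: negative indexes wrap, an out-of-range index is the
-- IndexError case and leaves the array unchanged — excluded by Pre_).
def pyArrSetD (xs : Array Int) (i : Int) (v : Int) : Array Int :=
  match PySem.List.pyIdx? xs.size i with
  | some k => xs.setIfInBounds k v
  | none => xs

def pvStarter (distance : Int) : List Int :=
  let c := PySem.Int.floordiv (distance - 1) 2
  let l0 := Array.replicate (distance - 1).toNat (0 : Int)
  let l1 := (PySem.List.pyRange 0 c 1).foldl
    (fun l i => pyArrSetD l (2 * i) (distance - 1 - i - 1)) l0
  ((PySem.List.pyRange 0 c 1).foldl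
    (fun l i => pyArrSetD l (2 * i + 1) (c - i - 1)) l1).toList

-- the inner 'for j in range(len(round))' loop building 'converted' from [0]*period
def pvBlock (distance : Int) (starter round : List Int) (period : Int) : List Int :=
  (PySem.List.pyRange 0 (round.length : Int) 1).foldl
    (fun c j =>
      let inner_period := 1 + PySem.Int.floordiv (distance - 1) 2
      let inner_sum := PySem.Int.mod j inner_period * (distance - 1)
      let inner_offset := PySem.List.pyGetD starter (PySem.Int.floordiv j inner_period) 0
      let conv_coord := inner_offset + inner_sum
      PySem.List.pySetD c conv_coord (PySem.List.pyGetD round j 0))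
    (List.replicate period.toNat (0 : Int))

-- The slice assignment stimSample[i*period:(i+1)*period] = converted is ported as
-- stimSample[:i*period] ++ converted ++ stimSample[(i+1)*period:], which is exactly
-- Python's splice semantics (slice bounds clamped the same way).
def sample_fromStim (stimSample : List Int) (distance : Int) : List Int :=
  let period := (distance + 1) * PySem.Int.floordiv (distance - 1) 2
  let starter := pvStarter distance
  (PySem.List.pyRange 0 (PySem.Int.floordiv (stimSample.length : Int) period) 1).foldl
    (fun s i =>
      let round := PySem.List.slice s (some (i * period)) (some ((i + 1) * period))
      let converted := pvBlock distance starter round period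
      PySem.List.slice s none (some (i * period)) ++ converted
        ++ PySem.List.slice s (some ((i + 1) * period)) none)
    stimSample

-- ===== PORT B =====
def sample_fromStim_alt (stimSample : List Int) (distance : Int) : List Int :=
  let half := PySem.Int.floordiv (distance - 1) 2
  let period := (distance + 1) * half
  let n_blocks := PySem.Int.floordiv (stimSample.length : Int) period
  if n_blocks ≤ 0 then stimSample
  else
    let width := distance - 1
    let src : Int → Int := fun k =>
      let r := PySem.Int.floordiv k width
      let s := PySem.Int.mod k width
      let q := if half ≤ s then 2 * (width - 1 - s) else 2 * (half - 1 - s) + 1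
      q * (half + 1) + r
    let head := (PySem.List.pyRange 0 (n_blocks * period) 1).map
      (fun k => PySem.List.pyGetD stimSample
        (PySem.Int.floordiv k period * period + src (PySem.Int.mod k period)) 0)
    -- stimSample[:n_blocks*period] = head, i.e. head ++ stimSample[n_blocks*period:]
    head ++ PySem.List.slice stimSample (some (n_blocks * period)) none

-- ===== PRECONDITION & SPEC =====
-- Pre_ excludes exactly the inputs on which A raises: period == 0 raises
-- ZeroDivisionError, and any distance that is not an odd distance ≥ 3 combined with
-- at least one full block (length ≥ period > 0) raises IndexError in the scatter loop.
def Pre_sample_fromStim (stimSample : List Int) (distance : Int) : Prop :=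
  (distance + 1) * PySem.Int.floordiv (distance - 1) 2 ≠ 0 ∧
  ((stimSample.length : Int) < (distance + 1) * PySem.Int.floordiv (distance - 1) 2 ∨
   (distance + 1) * PySem.Int.floordiv (distance - 1) 2 < 0 ∨
   (3 ≤ distance ∧ distance % 2 = 1))

instance (stimSample : List Int) (distance : Int) : Decidable (Pre_sample_fromStim stimSample distance) := by
  unfold Pre_sample_fromStim; infer_instance

def pvWitness_sample_fromStim : List Int × Int := ([1, 2, 3, 4], 3)

def Spec_sample_fromStim (stimSample : List Int) (distance : Int) (out : List Int) : Prop :=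
  out = sample_fromStim_alt stimSample distance

instance (stimSample : List Int) (distance : Int) (out : List Int) : Decidable (Spec_sample_fromStim stimSample distance out) := by
  unfold Spec_sample_fromStim; infer_instance

-- ===== CLAIM (what is proved, stated in full; the proofs are below) =====
def Claim_equal_sample_fromStim : Prop := ∀ (stimSample : List Int) (distance : Int),
  Dom_sample_fromStim stimSample distance → Pre_sample_fromStim stimSample distance →
  Spec_sample_fromStim stimSample distance (sample_fromStim stimSample distance)

-- ===== LEMMAS AND PROOFS =====

-- Nat-level descriptions of the permutation (distance = 2*m+1, period = 2*m*(m+1)).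
-- nf m q = starter_list[q]; coordN m j = conv_coord for source index j;
-- qf/srcN is the closed-form inverse used by B.
def nf (m q : Nat) : Nat := if q % 2 = 0 then 2 * m - 1 - q / 2 else m - 1 - q / 2
def coordN (m j : Nat) : Nat := nf m (j / (m + 1)) + (j % (m + 1)) * (2 * m)
def qf (m s : Nat) : Nat := if m ≤ s then 2 * (2 * m - 1 - s) else 2 * (m - 1 - s) + 1
def srcN (m k : Nat) : Nat := qf m (k % (2 * m)) * (m + 1) + k / (2 * m)

-- first `len` entries of the fully permuted sample
def pvGather (orig : List Int) (m len : Nat) : List Int :=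
  (List.range len).map (fun k =>
    orig.getD ((k / (2 * m * (m + 1))) * (2 * m * (m + 1)) + srcN m (k % (2 * m * (m + 1)))) 0)

-- one iteration of A's outer loop, distance = 2*m+1, in the rewritten (cast) form
def pvStep (m : Nat) (s : List Int) (i : Int) : List Int :=
  let p : Int := ((2 * m * (m + 1) : Nat) : Int)
  let round := PySem.List.slice s (some (i * p)) (some ((i + 1) * p))
  PySem.List.slice s none (some (i * p))
    ++ pvBlock (2 * (m : Int) + 1) (pvStarter (2 * (m : Int) + 1)) round p
    ++ PySem.List.slice s (some ((i + 1) * p)) none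

lemma pyRange_nonpos (n : Int) (h : n ≤ 0) : PySem.List.pyRange 0 n 1 = [] := by
  simp [PySem.List.pyRange]; omega

lemma len_foldl_set (l0 : List Int) (g : Nat → Nat) (v : Nat → Int) (is : List Nat) :
    (is.foldl (fun l i => l.set (g i) (v i)) l0).length = l0.length := by
  induction is generalizing l0 with
  | nil => rfl
  | cons a as ih => simp [List.foldl_cons, ih]

lemma getD_foldl_set_of_ne (l0 : List Int) (g : Nat → Nat) (v : Nat → Int) (is : List Nat)
    (k : Nat) (h : ∀ i ∈ is, g i ≠ k) :
    (is.foldl (fun l i => l.set (g i) (v i)) l0).getD k 0 = l0.getD k 0 := by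
  induction is generalizing l0 with
  | nil => rfl
  | cons a as ih =>
    simp only [List.foldl_cons]
    rw [ih _ (fun i hi => h i (List.mem_cons_of_mem _ hi))]
    simp [List.getD, List.getElem?_set, h a (List.mem_cons_self)]

lemma getD_foldl_set_range (l0 : List Int) (g : Nat → Nat) (v : Nat → Int) (mm i0 k : Nat)
    (hi0 : i0 < mm) (hg : g i0 = k) (hk : k < l0.length)
    (hu : ∀ i, i < mm → g i = k → i = i0) :
    ((List.range mm).foldl (fun l i => l.set (g i) (v i)) l0).getD k 0 = v i0 := by
  induction mm with
  | zero => omega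
  | succ mm ih =>
    rw [List.range_succ, List.foldl_append]
    simp only [List.foldl_cons, List.foldl_nil]
    by_cases hlast : i0 = mm
    · subst hlast
      have hlen : k < ((List.range i0).foldl (fun l i => l.set (g i) (v i)) l0).length := by
        rw [len_foldl_set]; exact hk
      rw [hg]
      simp [List.getD, List.getElem?_set, hlen]
    · have hne : g mm ≠ k := fun hc => hlast ((hu mm (by omega) hc).symm)
      rw [List.getD_eq_getElem?_getD, List.getElem?_set]
      simp only [hne, if_false, ← List.getD_eq_getElem?_getD]
      exact ih (by omega) (fun i hi hgi => hu i (by omega) hgi)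

-- ===== arithmetic facts about the permutation =====

lemma nf_lt (m q : Nat) (hm : 1 ≤ m) : nf m q < 2 * m := by
  unfold nf; split <;> omega

lemma qf_nf (m q : Nat) (hm : 1 ≤ m) (hq : q < 2 * m) : qf m (nf m q) = q := by
  unfold nf qf
  rcases Nat.even_or_odd q with hpar | hpar
  · obtain ⟨i, hi⟩ := hpar
    have h2 : q % 2 = 0 := by omega
    simp only [h2, if_true]
    have : m ≤ 2 * m - 1 - q / 2 := by omega
    simp only [this, if_true]; omega
  · obtain ⟨i, hi⟩ := hpar
    have h2 : ¬ q % 2 = 0 := by omega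
    simp only [h2, if_false]
    have : ¬ m ≤ m - 1 - q / 2 := by omega
    simp only [this, if_false]; omega

lemma nf_qf (m s : Nat) (hm : 1 ≤ m) (hs : s < 2 * m) : nf m (qf m s) = s := by
  unfold nf qf
  by_cases hcase : m ≤ s
  · simp only [hcase, if_true]
    have h2 : 2 * (2 * m - 1 - s) % 2 = 0 := by omega
    simp only [h2, if_true]; omega
  · simp only [hcase, if_false]
    have h2 : ¬ (2 * (m - 1 - s) + 1) % 2 = 0 := by omega
    simp only [h2, if_false]; omega

lemma qf_lt (m s : Nat) (hm : 1 ≤ m) (hs : s < 2 * m) : qf m s < 2 * m := by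
  unfold qf; split <;> omega

lemma srcN_lt (m k : Nat) (hm : 1 ≤ m) (hk : k < 2 * m * (m + 1)) :
    srcN m k < 2 * m * (m + 1) := by
  unfold srcN
  have hs : k % (2 * m) < 2 * m := Nat.mod_lt _ (by omega)
  have hr : k / (2 * m) < m + 1 := by
    rw [Nat.div_lt_iff_lt_mul (by omega)]
    calc k < 2 * m * (m + 1) := hk
    _ = (m + 1) * (2 * m) := by ring
  have hq : qf m (k % (2 * m)) < 2 * m := qf_lt m _ hm hs
  calc qf m (k % (2 * m)) * (m + 1) + k / (2 * m)
      < qf m (k % (2 * m)) * (m + 1) + (m + 1) := by omega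
    _ = (qf m (k % (2 * m)) + 1) * (m + 1) := by ring
    _ ≤ (2 * m) * (m + 1) := Nat.mul_le_mul_right _ (by omega)

lemma coordN_srcN (m k : Nat) (hm : 1 ≤ m) (hk : k < 2 * m * (m + 1)) :
    coordN m (srcN m k) = k := by
  unfold coordN srcN
  have hs : k % (2 * m) < 2 * m := Nat.mod_lt _ (by omega)
  have hr : k / (2 * m) < m + 1 := by
    rw [Nat.div_lt_iff_lt_mul (by omega)]
    calc k < 2 * m * (m + 1) := hk
    _ = (m + 1) * (2 * m) := by ring
  set q := qf m (k % (2 * m)) with hqdef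
  set r := k / (2 * m) with hrdef
  have hdiv : (q * (m + 1) + r) / (m + 1) = q := by
    rw [mul_comm q (m + 1), Nat.mul_add_div (by omega), Nat.div_eq_of_lt hr]; omega
  have hmod : (q * (m + 1) + r) % (m + 1) = r := by
    rw [mul_comm q (m + 1), Nat.mul_add_mod, Nat.mod_eq_of_lt hr]
  rw [hdiv, hmod, hqdef, nf_qf m _ hm hs, hrdef, mul_comm (k / (2 * m)) (2 * m)]
  linarith [Nat.div_add_mod k (2 * m)]

lemma srcN_coordN (m j : Nat) (hm : 1 ≤ m) (hj : j < 2 * m * (m + 1)) :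
    srcN m (coordN m j) = j ∧ coordN m j < 2 * m * (m + 1) := by
  unfold coordN srcN
  set q := j / (m + 1) with hqdef
  set r := j % (m + 1) with hrdef
  have hq : q < 2 * m := by
    rw [hqdef, Nat.div_lt_iff_lt_mul (by omega)]
    calc j < 2 * m * (m + 1) := hj
    _ = 2 * m * (m + 1) := rfl
  have hr : r < m + 1 := Nat.mod_lt _ (by omega)
  have hnf : nf m q < 2 * m := nf_lt m q hm
  have hmod : (nf m q + r * (2 * m)) % (2 * m) = nf m q := by
    rw [Nat.add_mul_mod_self_right, Nat.mod_eq_of_lt hnf]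
  have hdiv : (nf m q + r * (2 * m)) / (2 * m) = r := by
    rw [Nat.add_mul_div_right _ _ (by omega : 0 < 2 * m), Nat.div_eq_of_lt hnf]; omega
  constructor
  · rw [hmod, hdiv, qf_nf m q hm hq]
    have := Nat.div_add_mod j (m + 1)
    rw [mul_comm (m + 1) (j / (m + 1))] at this
    rw [hqdef, hrdef]
    linarith
  · have h1 : r * (2 * m) ≤ m * (2 * m) := Nat.mul_le_mul_right _ (by omega)
    nlinarith [hnf, h1]

-- the Array accumulator is the List accumulator, element for element
lemma toList_pyArrSetD (xs : Array Int) (i : Int) (v : Int) :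
    (pyArrSetD xs i v).toList = PySem.List.pySetD xs.toList i v := by
  unfold pyArrSetD PySem.List.pySetD PySem.List.pySet?
  rw [show xs.toList.length = xs.size from Array.length_toList]
  cases h : PySem.List.pyIdx? xs.size i with
  | none => simp
  | some k =>
    have hk : k < xs.size := by
      unfold PySem.List.pyIdx? at h
      split at h
      · split at h
        · injection h with h'; omega
        · cases h
      · split at h
        · injection h with h'; omega
        · cases h
    simp only [Option.map_some, Option.getD_some,
      Array.setIfInBounds, dif_pos hk, Array.toList_set]

lemma toList_foldl_pyArrSetD (is : List Int) (g v : Int → Int) (a : Array Int) :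
    (is.foldl (fun a i => pyArrSetD a (g i) (v i)) a).toList
      = is.foldl (fun l i => PySem.List.pySetD l (g i) (v i)) a.toList := by
  induction is generalizing a with
  | nil => rfl
  | cons x xs ih => simp only [List.foldl_cons, ih, toList_pyArrSetD]

-- ===== starter list characterization =====

lemma floordiv_two_m (m : Nat) : PySem.Int.floordiv (2 * (m : Int) + 1 - 1) 2 = (m : Int) := by
  rw [show 2 * (m : Int) + 1 - 1 = ((2 * m : Nat) : Int) by push_cast; ring,
      show (2 : Int) = ((2 : Nat) : Int) by norm_num, PySem.Int.floordiv_natCast]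
  congr 1; omega

lemma pvStarter_eq (m : Nat) :
    pvStarter (2 * (m : Int) + 1)
      = (List.range m).foldl (fun l i => l.set (2 * i + 1) ((m : Int) - (i : Int) - 1))
          ((List.range m).foldl (fun l i => l.set (2 * i) (2 * (m : Int) - (i : Int) - 1))
            (List.replicate (2 * m) 0)) := by
  simp only [pvStarter, floordiv_two_m m]
  rw [toList_foldl_pyArrSetD, toList_foldl_pyArrSetD, Array.toList_replicate]
  simp only [PySem.List.pyRange_zero_natCast, List.foldl_map,
    show ((2 * (m : Int) + 1 - 1)).toNat = 2 * m by omega]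
  have hb1 : (fun (l : List Int) (i : Nat) =>
      PySem.List.pySetD l (2 * (i : Int)) (2 * (m : Int) + 1 - 1 - (i : Int) - 1))
      = fun (l : List Int) (i : Nat) => l.set (2 * i) (2 * (m : Int) - (i : Int) - 1) := by
    funext l i
    rw [show (2 * (i : Int)) = ((2 * i : Nat) : Int) by push_cast; ring,
      PySem.List.pySetD_natCast]
    congr 1; ring
  have hb2 : (fun (l : List Int) (i : Nat) =>
      PySem.List.pySetD l (2 * (i : Int) + 1) ((m : Int) - (i : Int) - 1))
      = fun (l : List Int) (i : Nat) => l.set (2 * i + 1) ((m : Int) - (i : Int) - 1) := by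
    funext l i
    rw [show (2 * (i : Int) + 1) = ((2 * i + 1 : Nat) : Int) by push_cast; ring,
      PySem.List.pySetD_natCast]
  rw [hb1, hb2]

lemma pvStarter_getD (m q : Nat) (hm : 1 ≤ m) (hq : q < 2 * m) :
    (pvStarter (2 * (m : Int) + 1)).getD q 0 = ((nf m q : Nat) : Int) := by
  rw [pvStarter_eq]
  have hlen1 : ((List.range m).foldl
      (fun (l : List Int) i => l.set (2 * i) (2 * (m : Int) - (i : Int) - 1))
      (List.replicate (2 * m) 0)).length = 2 * m := by
    rw [len_foldl_set, List.length_replicate]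
  rcases Nat.even_or_odd q with hpar | hpar
  · obtain ⟨i0, hi0⟩ := hpar
    rw [getD_foldl_set_of_ne _ _ _ _ _ (by intro i _ ; omega)]
    rw [getD_foldl_set_range _ _ _ m (q / 2) q (by omega) (by omega)
      (by rw [List.length_replicate]; omega) (by intro i _ ; omega)]
    unfold nf
    simp only [show q % 2 = 0 by omega, if_true]
    push_cast; omega
  · obtain ⟨i0, hi0⟩ := hpar
    rw [getD_foldl_set_range _ _ _ m (q / 2) q (by omega) (by omega)
      (by rw [hlen1]; omega) (by intro i _ ; omega)]
    unfold nf
    simp only [show ¬ q % 2 = 0 by omega, if_false]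
    push_cast; omega

-- ===== converted block characterization =====

lemma pvBlock_spec (m : Nat) (hm : 1 ≤ m) (round : List Int)
    (hlen : round.length = 2 * m * (m + 1)) :
    pvBlock (2 * (m : Int) + 1) (pvStarter (2 * (m : Int) + 1)) round
        ((2 * m * (m + 1) : Nat) : Int)
      = (List.range (2 * m * (m + 1))).map (fun k => round.getD (srcN m k) 0) := by
  unfold pvBlock
  rw [hlen]
  simp only [PySem.List.pyRange_zero_natCast, List.foldl_map,
    show (((2 * m * (m + 1) : Nat) : Int)).toNat = 2 * m * (m + 1) by omega]
  rw [PySem.List.foldl_congr_mem _ _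
    (fun (c : List Int) (j : Nat) => c.set (coordN m j) (round.getD j 0)) _ ?hcong]
  case hcong =>
    intro acc j hj
    rw [List.mem_range] at hj
    have hq : j / (m + 1) < 2 * m := by
      rw [Nat.div_lt_iff_lt_mul (by omega)]
      calc j < 2 * m * (m + 1) := hj
      _ = 2 * m * (m + 1) := rfl
    simp only [floordiv_two_m m]
    rw [show (1 + (m : Int)) = ((m + 1 : Nat) : Int) by push_cast; ring,
      show ((j : Nat) : Int) = ((j : Nat) : Int) from rfl]
    rw [PySem.Int.floordiv_natCast, PySem.Int.mod_natCast, PySem.List.pyGetD_natCast,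
      pvStarter_getD m _ hm hq, PySem.List.pyGetD_natCast]
    rw [show ((nf m (j / (m + 1)) : Nat) : Int) + ((j % (m + 1) : Nat) : Int) * (2 * (m : Int) + 1 - 1)
        = ((coordN m j : Nat) : Int) by unfold coordN; push_cast; ring,
      PySem.List.pySetD_natCast]
  apply List.ext_getElem
  · rw [len_foldl_set, List.length_replicate, List.length_map, List.length_range]
  · intro k h1 h2
    have hk : k < 2 * m * (m + 1) := by
      rw [len_foldl_set, List.length_replicate] at h1; exact h1
    rw [← List.getD_eq_getElem _ 0 h1, ← List.getD_eq_getElem _ 0 h2]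
    rw [getD_foldl_set_range _ _ _ (2 * m * (m + 1)) (srcN m k) k
      (srcN_lt m k hm hk) (coordN_srcN m k hm hk)
      (by rw [List.length_replicate]; exact hk)
      (fun i hi hgi => by
        have h := (srcN_coordN m i hm hi).1
        rw [hgi] at h; exact h.symm)]
    simp [List.getD, hk]

-- ===== the outer loop =====

lemma pvStep_fold (orig : List Int) (m : Nat) (hm : 1 ≤ m) (t : Nat)
    (ht : t * (2 * m * (m + 1)) ≤ orig.length) :
    ((List.range t).map (fun (i : Nat) => (i : Int))).foldl (fun s i => pvStep m s i) orig
      = pvGather orig m (t * (2 * m * (m + 1))) ++ orig.drop (t * (2 * m * (m + 1))) := by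
  have hp : 0 < 2 * m * (m + 1) := by
    have : 0 < 2 * m := by omega
    exact Nat.mul_pos this (by omega)
  induction t with
  | zero => simp [pvGather]
  | succ t ih =>
    have hstep : (t + 1) * (2 * m * (m + 1)) = t * (2 * m * (m + 1)) + 2 * m * (m + 1) :=
      Nat.succ_mul _ _
    have ht2 : t * (2 * m * (m + 1)) + 2 * m * (m + 1) ≤ orig.length := hstep ▸ ht
    have ht' : t * (2 * m * (m + 1)) ≤ orig.length :=
      le_trans (Nat.le_add_right _ _) ht2
    rw [List.range_succ, List.map_append, List.foldl_append, List.map_singleton,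
      List.foldl_cons, List.foldl_nil, ih ht']
    have hG : (pvGather orig m (t * (2 * m * (m + 1)))).length = t * (2 * m * (m + 1)) := by
      unfold pvGather; simp
    simp only [pvStep]
    rw [show ((t : Nat) : Int) * ((2 * m * (m + 1) : Nat) : Int)
          = ((t * (2 * m * (m + 1)) : Nat) : Int) by push_cast; ring,
      show (((t : Nat) : Int) + 1) * ((2 * m * (m + 1) : Nat) : Int)
          = ((t * (2 * m * (m + 1)) : Nat) : Int) + ((2 * m * (m + 1) : Nat) : Int) by
        push_cast; ring]
    rw [PySem.List.slice_natCast_add, PySem.List.slice_to _ (by positivity),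
      PySem.List.slice_from _ (by positivity)]
    rw [show (((t * (2 * m * (m + 1)) : Nat) : Int)).toNat = t * (2 * m * (m + 1)) from
        Int.toNat_natCast _,
      show ((((t * (2 * m * (m + 1)) : Nat) : Int)) + ((2 * m * (m + 1) : Nat) : Int)).toNat
          = t * (2 * m * (m + 1)) + 2 * m * (m + 1) by
        rw [show (((t * (2 * m * (m + 1)) : Nat) : Int)) + ((2 * m * (m + 1) : Nat) : Int)
            = ((t * (2 * m * (m + 1)) + 2 * m * (m + 1) : Nat) : Int) by push_cast; ring]
        exact Int.toNat_natCast _]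
    rw [List.drop_left' hG, List.take_left' hG]
    have hdrop : List.drop (t * (2 * m * (m + 1)) + 2 * m * (m + 1))
        (pvGather orig m (t * (2 * m * (m + 1))) ++ List.drop (t * (2 * m * (m + 1))) orig)
        = List.drop (t * (2 * m * (m + 1)) + 2 * m * (m + 1)) orig := by
      rw [List.drop_append, hG, Nat.add_sub_cancel_left,
        List.drop_eq_nil_of_le (by rw [hG]; exact Nat.le_add_right _ _),
        List.drop_drop, List.nil_append]
    rw [hdrop]
    have hround : (List.take (2 * m * (m + 1)) (List.drop (t * (2 * m * (m + 1))) orig)).length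
        = 2 * m * (m + 1) := by
      rw [List.length_take, List.length_drop]
      exact Nat.min_eq_left (Nat.le_sub_of_add_le (by rw [Nat.add_comm]; exact ht2))
    rw [pvBlock_spec m hm _ hround]
    have hgather : pvGather orig m (t * (2 * m * (m + 1)) + 2 * m * (m + 1))
        = pvGather orig m (t * (2 * m * (m + 1)))
          ++ (List.range (2 * m * (m + 1))).map (fun k =>
              (List.take (2 * m * (m + 1)) (List.drop (t * (2 * m * (m + 1))) orig)).getD
                (srcN m k) 0) := by
      unfold pvGather
      rw [List.range_add, List.map_append, List.map_map]
      congr 1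
      apply List.map_congr_left
      intro k hk
      rw [List.mem_range] at hk
      simp only [Function.comp]
      have hdiv : (t * (2 * m * (m + 1)) + k) / (2 * m * (m + 1)) = t := by
        rw [mul_comm t (2 * m * (m + 1)), Nat.mul_add_div hp, Nat.div_eq_of_lt hk]
        omega
      have hmod : (t * (2 * m * (m + 1)) + k) % (2 * m * (m + 1)) = k := by
        rw [mul_comm t (2 * m * (m + 1)), Nat.mul_add_mod, Nat.mod_eq_of_lt hk]
      rw [hdiv, hmod]
      have hsrc : srcN m k < 2 * m * (m + 1) := srcN_lt m k hm hk
      simp [List.getD, List.getElem?_take, hsrc, List.getElem?_drop]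
    rw [hstep, hgather, List.append_assoc]

-- ===== case analysis glue =====

lemma floordiv_nonpos_of_neg (a b : Int) (ha : 0 ≤ a) (hb : b < 0) :
    PySem.Int.floordiv a b ≤ 0 := by
  have h1 := PySem.Int.floordiv_mul_add_mod a b
  have h2 := PySem.Int.mod_neg_bounds (a := a) hb
  by_contra h
  push_neg at h
  nlinarith [h2.1, h2.2]

lemma period_eq (m : Nat) :
    (2 * (m : Int) + 1 + 1) * PySem.Int.floordiv (2 * (m : Int) + 1 - 1) 2
      = ((2 * m * (m + 1) : Nat) : Int) := by
  rw [floordiv_two_m]; push_cast; ring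

lemma A_eq_fold (stim : List Int) (m : Nat) (hm : 1 ≤ m) :
    sample_fromStim stim (2 * (m : Int) + 1)
      = ((List.range (stim.length / (2 * m * (m + 1)))).map (fun (i : Nat) => (i : Int))).foldl
          (fun s i => pvStep m s i) stim := by
  simp only [sample_fromStim]
  rw [period_eq m, show ((stim.length : Nat) : Int) = ((stim.length : Nat) : Int) from rfl,
    PySem.Int.floordiv_natCast, PySem.List.pyRange_zero_natCast]
  apply PySem.List.foldl_congr_mem
  intro acc x _
  simp only [pvStep]

lemma B_eq_gather (stim : List Int) (m : Nat) (hm : 1 ≤ m)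
    (hn : 1 ≤ stim.length / (2 * m * (m + 1))) :
    sample_fromStim_alt stim (2 * (m : Int) + 1)
      = pvGather stim m ((stim.length / (2 * m * (m + 1))) * (2 * m * (m + 1)))
        ++ stim.drop ((stim.length / (2 * m * (m + 1))) * (2 * m * (m + 1))) := by
  simp only [sample_fromStim_alt]
  rw [period_eq m, floordiv_two_m m, PySem.Int.floordiv_natCast]
  rw [if_neg (by omega)]
  congr 1
  · -- head = pvGather
    rw [show ((stim.length / (2 * m * (m + 1)) : Nat) : Int) * ((2 * m * (m + 1) : Nat) : Int)
        = ((stim.length / (2 * m * (m + 1)) * (2 * m * (m + 1)) : Nat) : Int) by push_cast; ring,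
      PySem.List.pyRange_zero_natCast, List.map_map]
    unfold pvGather
    apply List.map_congr_left
    intro k hk
    rw [List.mem_range] at hk
    simp only [Function.comp]
    rw [show (2 * (m : Int) + 1 - 1) = ((2 * m : Nat) : Int) by push_cast; ring,
      PySem.Int.floordiv_natCast, PySem.Int.mod_natCast, PySem.Int.floordiv_natCast,
      PySem.Int.mod_natCast]
    have hq : (if (m : Int) ≤ ((k % (2 * m * (m + 1)) % (2 * m) : Nat) : Int)
        then 2 * (((2 * m : Nat) : Int) - 1 - ((k % (2 * m * (m + 1)) % (2 * m) : Nat) : Int))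
        else 2 * ((m : Int) - 1 - ((k % (2 * m * (m + 1)) % (2 * m) : Nat) : Int)) + 1)
        = ((qf m (k % (2 * m * (m + 1)) % (2 * m)) : Nat) : Int) := by
      have hs : k % (2 * m * (m + 1)) % (2 * m) < 2 * m := Nat.mod_lt _ (by omega)
      unfold qf
      split
      · rw [if_pos (by omega)]; omega
      · rw [if_neg (by omega)]; omega
    rw [hq]
    rw [show ((qf m (k % (2 * m * (m + 1)) % (2 * m)) : Nat) : Int) * ((m : Int) + 1)
          + ((k % (2 * m * (m + 1)) / (2 * m) : Nat) : Int)
        = ((srcN m (k % (2 * m * (m + 1))) : Nat) : Int) by unfold srcN; push_cast; ring]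
    rw [show ((k / (2 * m * (m + 1)) : Nat) : Int) * ((2 * m * (m + 1) : Nat) : Int)
          + ((srcN m (k % (2 * m * (m + 1))) : Nat) : Int)
        = ((k / (2 * m * (m + 1)) * (2 * m * (m + 1)) + srcN m (k % (2 * m * (m + 1))) : Nat) : Int)
        by push_cast; ring]
    rw [PySem.List.pyGetD_natCast]
  · rw [show ((stim.length / (2 * m * (m + 1)) : Nat) : Int) * ((2 * m * (m + 1) : Nat) : Int)
        = ((stim.length / (2 * m * (m + 1)) * (2 * m * (m + 1)) : Nat) : Int) by push_cast; ring,
      PySem.List.slice_from _ (by positivity), Int.toNat_natCast]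

-- ===== VERDICT =====
theorem sample_fromStim_spec : Claim_equal_sample_fromStim := by
  intro stim d _ hpre
  obtain ⟨hp0, hcases⟩ := hpre
  unfold Spec_sample_fromStim
  by_cases hn0 : PySem.Int.floordiv ((stim.length : Nat) : Int)
      ((d + 1) * PySem.Int.floordiv (d - 1) 2) ≤ 0
  · -- no full block on either side
    simp only [sample_fromStim, sample_fromStim_alt]
    rw [pyRange_nonpos _ hn0, List.foldl_nil, if_pos hn0]
  · -- at least one full block: Pre_ forces an odd distance ≥ 3
    have hodd : 3 ≤ d ∧ d % 2 = 1 := by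
      rcases hcases with hlt | hneg | hodd
      · rcases lt_trichotomy ((d + 1) * PySem.Int.floordiv (d - 1) 2) 0 with h | h | h
        · exact absurd (floordiv_nonpos_of_neg _ _ (by positivity) h) hn0
        · exact absurd h hp0
        · exfalso
          apply hn0
          have : PySem.Int.floordiv ((stim.length : Nat) : Int)
              ((d + 1) * PySem.Int.floordiv (d - 1) 2) = 0 := by
            rw [PySem.Int.floordiv_eq_iff_of_pos h]
            constructor
            · simpa using Int.natCast_nonneg stim.length
            · simpa using hlt
          omega
      · exact absurd (floordiv_nonpos_of_neg _ _ (by positivity) hneg) hn0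
      · exact hodd
    obtain ⟨m, hdm, hm⟩ : ∃ m : Nat, d = 2 * (m : Int) + 1 ∧ 1 ≤ m :=
      ⟨((d - 1) / 2).toNat, by omega, by omega⟩
    subst hdm
    rw [period_eq m, PySem.Int.floordiv_natCast] at hn0
    have hn : 1 ≤ stim.length / (2 * m * (m + 1)) := by
      by_contra h
      exact hn0 (by omega)
    rw [A_eq_fold stim m hm,
      pvStep_fold stim m hm _ (Nat.div_mul_le_self stim.length (2 * m * (m + 1))),
      B_eq_gather stim m hm hn]
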